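-- pv_equiv track=rewrite | github.com/JZU0/codingtest-practice | 프로그래머스/2/132265. 롤케이크 자르기/롤케이크 자르기.py | solution
-- ===== SOURCE A (Python) =====
-- def solution(topping):
--     right_count = {}
--     for t in topping:
--         if t in right_count:
--             right_count[t] += 1
--         else:
--             right_count[t] = 1
--
--     left_types = set()
--     answer = 0
--
--     for t in topping:
--         left_types.add(t)
--         right_count[t] -= 1
--
--         if right_count[t] == 0:
--             del right_count[t]
--
--         if len(left_types) == len(right_count):
--             answer += 1
--
--     return answer
-- ===== SOURCE B (Python) =====
-- def solution(topping):
--     # Event-counting: precompute each value's first and last occurrence index,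
--     # then sweep one integer counter c = (#first-occurrences seen) + (#last-occurrences seen);
--     # c - distinct == (distinct in prefix) - (distinct in suffix), so count i with c == distinct.
--     last = {}
--     for i, t in enumerate(topping):
--         last[t] = i
--     first = {}
--     for i, t in enumerate(topping):
--         if t not in first:
--             first[t] = i
--     distinct = len(first)
--     c = 0
--     answer = 0
--     for i, t in enumerate(topping):
--         if first[t] == i:
--             c += 1
--         if last[t] == i:
--             c += 1
--         if c == distinct:
--             answer += 1
--     return answer
-- ===== Notes on version B (the rewrite author's own statement) =====
-- stated objective: alternative
-- what changed: Replaces A's live set/shrinking-counter-dict sweep by event counting: precompute each value's first and last occurrence index, then sweep a single integer counter of first/last-occurrence events and count positions where it equals the total number of distinct values.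
import Mathlib
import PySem

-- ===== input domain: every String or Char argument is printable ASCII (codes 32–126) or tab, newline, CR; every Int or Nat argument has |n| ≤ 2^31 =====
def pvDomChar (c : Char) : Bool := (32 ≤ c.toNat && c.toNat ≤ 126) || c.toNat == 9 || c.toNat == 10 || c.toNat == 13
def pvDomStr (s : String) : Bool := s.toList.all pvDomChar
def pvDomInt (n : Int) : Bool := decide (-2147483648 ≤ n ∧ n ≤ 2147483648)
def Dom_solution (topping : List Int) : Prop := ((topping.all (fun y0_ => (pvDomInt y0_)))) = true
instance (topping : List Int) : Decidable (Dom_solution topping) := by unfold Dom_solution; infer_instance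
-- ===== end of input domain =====

-- B counts first/last-occurrence events with one integer counter instead of A's live set plus shrinking count dictionary; same cost, different algorithm.

-- ===== PORT A =====
-- A: build right_count, then sweep left adding to a set, decrementing the dict and deleting zeros, comparing sizes.
def solution (topping : List Int) : Int :=
  let rc0 : PySem.Dict Int Int :=
    topping.foldl (fun d t =>
      if d.contains t then d.insert t (d.getD t 0 + 1) else d.insert t 1) PySem.Dict.empty
  let fin := topping.foldl (fun (st : PySem.Set Int × PySem.Dict Int Int × Int) t =>
      let lt := st.1.add t
      -- right_count[t] -= 1 (t is always a present key at this point, so plain overwrite is exact)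
      let rc1 := st.2.1.insert t (st.2.1.getD t 0 - 1)
      let rc2 := if rc1.getD t 0 == 0 then rc1.erase t else rc1
      let ans := if lt.length == rc2.size then st.2.2 + 1 else st.2.2
      (lt, rc2, ans)) (PySem.Set.empty, rc0, 0)
  fin.2.2

-- ===== PORT B =====
-- B: two dict-building passes (last and first occurrence index per value), then one pass over
-- enumerate(topping) bumping a counter at first/last occurrences and comparing it to len(first).
def solution_alt (topping : List Int) : Int :=
  let last := (PySem.List.enumerate topping 0).foldl
      (fun (d : PySem.Dict Int Int) p => d.insert p.2 p.1) PySem.Dict.empty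
  let first := (PySem.List.enumerate topping 0).foldl
      (fun (d : PySem.Dict Int Int) p => if d.contains p.2 then d else d.insert p.2 p.1) PySem.Dict.empty
  let distinct : Int := (first.size : Int)
  let fin := (PySem.List.enumerate topping 0).foldl (fun (st : Int × Int) p =>
      let c1 := if first.getD p.2 0 == p.1 then st.1 + 1 else st.1
      let c2 := if last.getD p.2 0 == p.1 then c1 + 1 else c1
      (c2, if c2 == distinct then st.2 + 1 else st.2)) ((0 : Int), (0 : Int))
  fin.2

-- ===== PRECONDITION & SPEC =====
def Spec_solution (topping : List Int) (out : Int) : Prop := out = solution_alt topping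
instance (topping : List Int) (out : Int) : Decidable (Spec_solution topping out) := by unfold Spec_solution; infer_instance

-- ===== CLAIM =====
def Claim_equal_solution : Prop := ∀ (topping : List Int), Dom_solution topping → Spec_solution topping (solution topping)

-- ===== LEMMAS AND PROOFS =====

-- number of distinct elements
def DD (xs : List Int) : Nat := (PySem.Set.ofList xs).length

-- common specification: count splits (after each element) where prefix and suffix have equally many distinct values
def cnt : List Int → List Int → Int
  | _, [] => 0
  | p, t :: r => (if DD (p ++ [t]) = DD r then 1 else 0) + cnt (p ++ [t]) r

-- A-side specification fold: walk the list with the growing left set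
def specGo (left : PySem.Set Int) : List Int → Int
  | [] => 0
  | t :: rest => (if (left.add t).length = DD rest then 1 else 0) + specGo (left.add t) rest

lemma length_eq_of_nodup_mem (l1 l2 : List Int) (h1 : l1.Nodup) (h2 : l2.Nodup)
    (h : ∀ x, x ∈ l1 ↔ x ∈ l2) : l1.length = l2.length := by
  rw [← List.toFinset_card_of_nodup h1, ← List.toFinset_card_of_nodup h2]
  congr 1
  ext x
  simp [h x]

-- erase lemmas (PySem.Dict.erase filters the items by key)
lemma get?_erase_self (d : PySem.Dict Int Int) (k : Int) : (d.erase k).get? k = none := by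
  simp only [PySem.Dict.erase, PySem.Dict.get?, Option.map_eq_none_iff]
  rw [List.find?_eq_none]
  intro p hp
  simp only [List.mem_filter] at hp
  simpa using hp.2

lemma find?_filter_ne (k k' : Int) (h : k' ≠ k) (l : List (Int × Int)) :
    List.find? (fun p => p.1 == k') (l.filter (fun p => !(p.1 == k)))
    = List.find? (fun p => p.1 == k') l := by
  induction l with
  | nil => rfl
  | cons p rest ih =>
    rw [List.filter_cons]
    by_cases hk : p.1 = k
    · rw [if_neg (by simp [hk]), List.find?_cons_of_neg (by simp [hk, Ne.symm h]), ih]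
    · rw [if_pos (by simp [hk])]
      by_cases hp : p.1 = k'
      · rw [List.find?_cons_of_pos (by simp [hp]), List.find?_cons_of_pos (by simp [hp])]
      · rw [List.find?_cons_of_neg (by simp [hp]), List.find?_cons_of_neg (by simp [hp]), ih]

lemma get?_erase_of_ne (d : PySem.Dict Int Int) (k k' : Int) (h : k' ≠ k) :
    (d.erase k).get? k' = d.get? k' := by
  simp only [PySem.Dict.erase, PySem.Dict.get?]
  rw [find?_filter_ne k k' h]

lemma nodup_keys_erase (d : PySem.Dict Int Int) (k : Int) (h : d.keys.Nodup) :
    (d.erase k).keys.Nodup := by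
  simp only [PySem.Dict.erase, PySem.Dict.keys] at *
  exact h.sublist (List.filter_sublist.map _)

-- invariant for A's second loop: rc records exactly the multiplicities of the remaining suffix
def RInv (rc : PySem.Dict Int Int) (rest : List Int) : Prop :=
  rc.keys.Nodup ∧ ∀ k, rc.get? k = if 0 < rest.count k then some ((rest.count k : Nat) : Int) else none

lemma rinv_size (rc : PySem.Dict Int Int) (rest : List Int) (h : RInv rc rest) :
    rc.size = DD rest := by
  obtain ⟨hnd, hget⟩ := h
  have hlen : rc.keys.length = (PySem.Set.ofList rest).length := by
    apply length_eq_of_nodup_mem _ _ hnd (PySem.Set.nodup_ofList rest)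
    intro x
    rw [PySem.Set.mem_ofList]
    have hiff := PySem.Dict.get?_eq_none_iff_not_mem_keys rc x
    rw [hget x] at hiff
    by_cases hc : 0 < rest.count x
    · simp only [hc, if_pos] at hiff
      have hx : x ∈ rest := List.count_pos_iff.mp hc
      simp at hiff
      tauto
    · simp only [hc, if_neg, not_false_iff] at hiff
      have hx : x ∉ rest := by
        intro hm; exact hc (List.count_pos_iff.mpr hm)
      simp at hiff
      tauto
  simpa [PySem.Dict.size, PySem.Dict.keys, DD] using hlen

lemma get?_counter (xs : List Int) (k : Int) :
    (PySem.Dict.counter xs).get? k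
    = if 0 < xs.count k then some ((xs.count k : Nat) : Int) else none := by
  by_cases hm : k ∈ xs
  · have hpos : 0 < xs.count k := List.count_pos_iff.mpr hm
    have hc : ((PySem.Dict.counter xs).get? k).isSome = true := by
      rw [← PySem.Dict.contains_eq_isSome_get?, PySem.Dict.contains_counter]
      simpa using hm
    obtain ⟨v, hg⟩ := Option.isSome_iff_exists.mp hc
    have hD := PySem.Dict.getD_counter xs k
    rw [PySem.Dict.getD_eq_get?_getD, hg] at hD
    simp only [Option.getD_some] at hD
    rw [hg, hD, if_pos hpos]
  · have hc : ((PySem.Dict.counter xs).get? k).isSome = false := by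
      rw [← PySem.Dict.contains_eq_isSome_get?, PySem.Dict.contains_counter]
      simpa using hm
    have hn : (PySem.Dict.counter xs).get? k = none := by
      cases hg : (PySem.Dict.counter xs).get? k <;> simp_all
    rw [hn, if_neg]
    simp [List.count_eq_zero.mpr hm]

lemma rinv_counter (xs : List Int) : RInv (PySem.Dict.counter xs) xs :=
  ⟨PySem.Dict.nodup_keys_counter xs, get?_counter xs⟩

lemma rc0_eq_counter (xs : List Int) :
    xs.foldl (fun d t => if d.contains t then d.insert t (d.getD t 0 + 1) else d.insert t 1)
      PySem.Dict.empty = PySem.Dict.counter xs := by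
  have hf : (fun (d : PySem.Dict Int Int) t =>
      if d.contains t then d.insert t (d.getD t 0 + 1) else d.insert t 1)
      = (fun (d : PySem.Dict Int Int) t => d.insert t (d.getD t 0 + 1)) := by
    funext d t
    cases hc : d.contains t with
    | true => simp
    | false => rw [if_neg (by simp), PySem.Dict.getD_of_not_contains d 0 hc]; norm_num
  rw [hf, PySem.Dict.foldl_insert_getD_add_one_eq_counter]

lemma rinv_step (rc : PySem.Dict Int Int) (t : Int) (rest' : List Int) (h : RInv rc (t :: rest')) :
    RInv (if (rc.insert t (rc.getD t 0 - 1)).getD t 0 == 0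
          then (rc.insert t (rc.getD t 0 - 1)).erase t
          else rc.insert t (rc.getD t 0 - 1)) rest' := by
  obtain ⟨hnd, hget⟩ := h
  have hco : (t :: rest').count t = rest'.count t + 1 := by simp
  have hgt : rc.get? t = some (((rest'.count t + 1 : Nat) : Int)) := by
    rw [hget t, hco]; simp
  have hgD : rc.getD t 0 = ((rest'.count t + 1 : Nat) : Int) := by
    rw [PySem.Dict.getD_eq_get?_getD, hgt]; rfl
  have h1 : (rc.insert t (rc.getD t 0 - 1)).getD t 0 = ((rest'.count t : Nat) : Int) := by
    rw [PySem.Dict.getD_eq_get?_getD, PySem.Dict.get?_insert_self, hgD]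
    push_cast
    simp
  by_cases hz : rest'.count t = 0
  · have hcond : ((rc.insert t (rc.getD t 0 - 1)).getD t 0 == 0) = true := by
      rw [h1, hz]; rfl
    rw [if_pos hcond]
    refine ⟨nodup_keys_erase _ _ (PySem.Dict.nodup_keys_insert _ _ _ hnd), fun k => ?_⟩
    by_cases hk : k = t
    · rw [hk, get?_erase_self]
      simp [hz]
    · rw [get?_erase_of_ne _ _ _ hk, PySem.Dict.get?_insert_of_ne _ _ hk, hget k]
      simp [Ne.symm hk]
  · have hcond : ¬(((rc.insert t (rc.getD t 0 - 1)).getD t 0 == 0) = true) := by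
      rw [h1]
      simpa using hz
    rw [if_neg hcond]
    refine ⟨PySem.Dict.nodup_keys_insert _ _ _ hnd, fun k => ?_⟩
    by_cases hk : k = t
    · rw [hk, PySem.Dict.get?_insert_self, hgD]
      have hpos : 0 < rest'.count t := Nat.pos_of_ne_zero hz
      rw [if_pos hpos]
      push_cast
      ring_nf
    · rw [PySem.Dict.get?_insert_of_ne _ _ hk, hget k]
      simp [Ne.symm hk]

lemma A_loop (rest : List Int) : ∀ (left : PySem.Set Int) (ans : Int) (rc : PySem.Dict Int Int),
    RInv rc rest →
    (rest.foldl (fun (st : PySem.Set Int × PySem.Dict Int Int × Int) t =>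
      (st.1.add t,
       (if (st.2.1.insert t (st.2.1.getD t 0 - 1)).getD t 0 == 0
        then (st.2.1.insert t (st.2.1.getD t 0 - 1)).erase t
        else st.2.1.insert t (st.2.1.getD t 0 - 1)),
       if (st.1.add t).length ==
          (if (st.2.1.insert t (st.2.1.getD t 0 - 1)).getD t 0 == 0
           then (st.2.1.insert t (st.2.1.getD t 0 - 1)).erase t
           else st.2.1.insert t (st.2.1.getD t 0 - 1)).size
       then st.2.2 + 1 else st.2.2)) (left, rc, ans)).2.2 = ans + specGo left rest := by
  induction rest with
  | nil => intro left ans rc _; simp [specGo]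
  | cons t rest' ih =>
    intro left ans rc h
    have hinv := rinv_step rc t rest' h
    have hsz := rinv_size _ _ hinv
    rw [List.foldl_cons]
    rw [ih _ _ _ hinv]
    simp only [specGo, hsz]
    by_cases hc : (left.add t).length = DD rest'
    · rw [if_pos (by simpa using hc), if_pos hc]
      ring
    · rw [if_neg (by simpa using hc), if_neg hc]
      ring

lemma ofList_append_singleton (ys : List Int) (t : Int) :
    PySem.Set.ofList (ys ++ [t]) = (PySem.Set.ofList ys).add t := by
  rw [PySem.Set.ofList_eq_foldl, PySem.Set.ofList_eq_foldl, List.foldl_append]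
  rfl

lemma specGo_eq_cnt (r : List Int) : ∀ p, specGo (PySem.Set.ofList p) r = cnt p r := by
  induction r with
  | nil => intro p; rfl
  | cons t r' ih =>
    intro p
    show (if ((PySem.Set.ofList p).add t).length = DD r' then (1:Int) else 0)
        + specGo ((PySem.Set.ofList p).add t) r' = cnt p (t :: r')
    rw [← ofList_append_singleton, ih]
    rfl

-- ===== B-side lemmas =====

lemma DD_eq_card (xs : List Int) : DD xs = xs.toFinset.card := by
  rw [DD, ← List.toFinset_card_of_nodup (PySem.Set.nodup_ofList xs)]
  congr 1
  ext x
  simp [PySem.Set.mem_ofList]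

lemma DD_append_singleton (p : List Int) (t : Int) :
    (DD (p ++ [t]) : Int) = (DD p : Int) + (if t ∈ p then 0 else 1) := by
  rw [DD_eq_card, DD_eq_card]
  by_cases h : t ∈ p
  · rw [if_pos h]
    have : (p ++ [t]).toFinset = p.toFinset := by
      ext x
      simp only [List.mem_toFinset, List.mem_append, List.mem_singleton]
      constructor
      · rintro (hx | rfl)
        · exact hx
        · exact h
      · exact fun hx => Or.inl hx
    rw [this]; ring
  · rw [if_neg h]
    have : (p ++ [t]).toFinset = insert t p.toFinset := by
      ext x; simp
    rw [this, Finset.card_insert_of_notMem (by simpa using h)]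
    push_cast; ring

lemma DD_cons (t : Int) (r : List Int) :
    (DD (t :: r) : Int) = (DD r : Int) + (if t ∈ r then 0 else 1) := by
  rw [DD_eq_card, DD_eq_card, List.toFinset_cons]
  by_cases h : t ∈ r
  · rw [if_pos h, Finset.insert_eq_self.mpr (by simpa using h)]; ring
  · rw [if_neg h, Finset.card_insert_of_notMem (by simpa using h)]
    push_cast; ring

-- the "first" dict: value of each key = index of its first occurrence
lemma first_fold_get? (xs : List Int) : ∀ (s : Int) (d : PySem.Dict Int Int) (t : Int),
    ((PySem.List.enumerate xs s).foldl
      (fun d p => if d.contains p.2 then d else d.insert p.2 p.1) d).get? t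
    = if d.contains t then d.get? t
      else if t ∈ xs then some (s + (xs.idxOf t : Int)) else none := by
  induction xs with
  | nil =>
    intro s d t
    rw [PySem.List.enumerate_nil, List.foldl_nil]
    by_cases hc : d.contains t
    · rw [if_pos hc]
    · rw [if_neg hc, if_neg (by simp)]
      rw [PySem.Dict.get?_eq_none_iff_contains]
      simpa using hc
  | cons x xs' ih =>
    intro s d t
    rw [PySem.List.enumerate_cons, List.foldl_cons]
    show ((PySem.List.enumerate xs' (s+1)).foldl _
        (if d.contains x then d else d.insert x s)).get? t = _
    rw [ih]
    by_cases hdx : d.contains x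
    · rw [if_pos hdx]
      by_cases hdt : d.contains t
      · rw [if_pos hdt, if_pos hdt]
      · have htx : t ≠ x := fun h => hdt (h ▸ hdx)
        rw [if_neg hdt, if_neg hdt]
        by_cases hm : t ∈ xs'
        · rw [if_pos hm, if_pos (by simp [hm]), List.idxOf_cons_ne _ (Ne.symm htx)]
          congr 1; push_cast; ring
        · rw [if_neg hm, if_neg (by simp [htx, hm])]
    · rw [if_neg hdx]
      by_cases htx : t = x
      · subst htx
        rw [if_pos (PySem.Dict.contains_insert_self d t s), if_neg hdx,
          PySem.Dict.get?_insert_self, if_pos (by simp), List.idxOf_cons_self]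
        simp
      · have hcdi : (d.insert x s).contains t = d.contains t := by
          rw [PySem.Dict.contains_insert]
          simp [htx]
        rw [hcdi]
        by_cases hdt : d.contains t
        · rw [if_pos hdt, if_pos hdt, PySem.Dict.get?_insert_of_ne _ _ htx]
        · rw [if_neg hdt, if_neg hdt]
          by_cases hm : t ∈ xs'
          · rw [if_pos hm, if_pos (by simp [hm]), List.idxOf_cons_ne _ (Ne.symm htx)]
            congr 1; push_cast; ring
          · rw [if_neg hm, if_neg (by simp [htx, hm])]

-- the "last" dict: value of each key = index of its last occurrence
lemma last_fold_get? (xs : List Int) : ∀ (s : Int) (d : PySem.Dict Int Int) (t : Int),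
    ((PySem.List.enumerate xs s).foldl
      (fun d p => d.insert p.2 p.1) d).get? t
    = if t ∈ xs then some (s + (xs.length : Int) - 1 - (xs.reverse.idxOf t : Int))
      else d.get? t := by
  induction xs with
  | nil =>
    intro s d t
    rw [PySem.List.enumerate_nil, List.foldl_nil, if_neg (by simp)]
  | cons x xs' ih =>
    intro s d t
    rw [PySem.List.enumerate_cons, List.foldl_cons]
    show ((PySem.List.enumerate xs' (s+1)).foldl _ (d.insert x s)).get? t = _
    rw [ih]
    by_cases hm : t ∈ xs'
    · rw [if_pos hm, if_pos (by simp [hm]), List.reverse_cons,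
        List.idxOf_append_of_mem (by simpa using hm)]
      have hlt : xs'.reverse.idxOf t < xs'.length := by
        simpa using List.idxOf_lt_length_of_mem (by simpa using hm : t ∈ xs'.reverse)
      congr 1
      push_cast [List.length_cons, List.length_reverse]
      omega
    · rw [if_neg hm]
      by_cases htx : t = x
      · subst htx
        rw [PySem.Dict.get?_insert_self, if_pos (by simp), List.reverse_cons,
          List.idxOf_append_of_notMem (by simpa using hm), List.idxOf_cons_self]
        congr 1
        push_cast [List.length_cons, List.length_reverse]
        omega
      · rw [PySem.Dict.get?_insert_of_ne _ _ htx, if_neg (by simp [htx, hm])]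

lemma first_fold_nodup (xs : List Int) : ∀ (s : Int) (d : PySem.Dict Int Int),
    d.keys.Nodup →
    ((PySem.List.enumerate xs s).foldl
      (fun d p => if d.contains p.2 then d else d.insert p.2 p.1) d).keys.Nodup := by
  induction xs with
  | nil => intro s d h; rwa [PySem.List.enumerate_nil, List.foldl_nil]
  | cons x xs' ih =>
    intro s d h
    rw [PySem.List.enumerate_cons, List.foldl_cons]
    refine ih (s+1) _ ?_
    by_cases hc : d.contains x
    · simpa [hc] using h
    · simpa [hc] using PySem.Dict.nodup_keys_insert d x s h

lemma first_fold_size (xs : List Int) :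
    ((PySem.List.enumerate xs 0).foldl
      (fun (d : PySem.Dict Int Int) p => if d.contains p.2 then d else d.insert p.2 p.1)
      PySem.Dict.empty).size = DD xs := by
  have hnd := first_fold_nodup xs 0 PySem.Dict.empty (by simp [PySem.Dict.keys_empty])
  have hmem : ∀ t, t ∈ ((PySem.List.enumerate xs 0).foldl
      (fun (d : PySem.Dict Int Int) p => if d.contains p.2 then d else d.insert p.2 p.1)
      PySem.Dict.empty).keys ↔ t ∈ PySem.Set.ofList xs := by
    intro t
    rw [PySem.Set.mem_ofList, ← PySem.Dict.contains_iff_mem_keys]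
    rw [PySem.Dict.contains_eq_isSome_get?, first_fold_get?]
    by_cases hm : t ∈ xs
    · simp [hm, PySem.Dict.contains_empty]
    · simp [hm, PySem.Dict.contains_empty]
  have := length_eq_of_nodup_mem _ _ hnd (PySem.Set.nodup_ofList xs) hmem
  simpa [PySem.Dict.size, PySem.Dict.keys, DD] using this

lemma idxOf_split (p r : List Int) (t : Int) :
    (((p ++ t :: r).idxOf t : Int) = (p.length : Int)) ↔ t ∉ p := by
  by_cases h : t ∈ p
  · rw [List.idxOf_append_of_mem h]
    have := List.idxOf_lt_length_of_mem h
    constructor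
    · intro he; exfalso; omega
    · intro hn; exact absurd h hn
  · rw [List.idxOf_append_of_notMem h, List.idxOf_cons_self]
    simp [h]

lemma lastIdx_split (p r : List Int) (t : Int) :
    ((((p ++ t :: r).length : Int) - 1 - (((p ++ t :: r).reverse.idxOf t) : Int))
      = (p.length : Int)) ↔ t ∉ r := by
  rw [List.reverse_append, List.reverse_cons]
  have hlen : (p ++ t :: r).length = p.length + 1 + r.length := by simp; omega
  by_cases h : t ∈ r
  · have hmemrev : t ∈ r.reverse ++ [t] := by simp
    rw [List.idxOf_append_of_mem hmemrev,
      List.idxOf_append_of_mem (by simpa using h)]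
    have hlt : r.reverse.idxOf t < r.length := by
      simpa using List.idxOf_lt_length_of_mem (by simpa using h : t ∈ r.reverse)
    constructor
    · intro he; exfalso; rw [hlen] at he; push_cast at he; omega
    · intro hn; exact absurd h hn
  · have hnm : t ∉ r.reverse := by simpa using h
    rw [List.idxOf_append_of_mem (by simp),
      List.idxOf_append_of_notMem hnm, List.idxOf_cons_self, hlen]
    simp [h]
    omega

lemma B_loop (xs : List Int) (F L : PySem.Dict Int Int)
    (hF : ∀ (p : List Int) (t : Int) (r : List Int), xs = p ++ t :: r →
      ((F.getD t 0 = ((p.length : Nat) : Int)) ↔ t ∉ p))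
    (hL : ∀ (p : List Int) (t : Int) (r : List Int), xs = p ++ t :: r →
      ((L.getD t 0 = ((p.length : Nat) : Int)) ↔ t ∉ r)) :
    ∀ (r p : List Int) (c ans : Int), xs = p ++ r →
    c = (DD p : Int) + (DD xs : Int) - (DD r : Int) →
    ((PySem.List.enumerate r ((p.length : Nat) : Int)).foldl (fun (st : Int × Int) q =>
        ((if L.getD q.2 0 == q.1 then (if F.getD q.2 0 == q.1 then st.1 + 1 else st.1) + 1
          else (if F.getD q.2 0 == q.1 then st.1 + 1 else st.1)),
         if (if L.getD q.2 0 == q.1 then (if F.getD q.2 0 == q.1 then st.1 + 1 else st.1) + 1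
             else (if F.getD q.2 0 == q.1 then st.1 + 1 else st.1)) == ((DD xs : Nat) : Int)
         then st.2 + 1 else st.2)) (c, ans)).2 = ans + cnt p r := by
  intro r
  induction r with
  | nil =>
    intro p c ans _ _
    rw [PySem.List.enumerate_nil, List.foldl_nil]
    simp [cnt]
  | cons t r' ih =>
    intro p c ans hxs hc
    rw [PySem.List.enumerate_cons, List.foldl_cons]
    have hFt := hF p t r' hxs
    have hLt := hL p t r' hxs
    have hA := DD_append_singleton p t
    have hC := DD_cons t r'
    have hFb : (F.getD t 0 == ((p.length : Nat) : Int)) = decide (t ∉ p) := by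
      by_cases hp : t ∈ p
      · simp only [hp, not_true_eq_false, decide_false]
        exact beq_eq_false_iff_ne.mpr (fun h => (hFt.mp h) hp)
      · simp only [hp, not_false_eq_true, decide_true]
        exact beq_iff_eq.mpr (hFt.mpr hp)
    have hLb : (L.getD t 0 == ((p.length : Nat) : Int)) = decide (t ∉ r') := by
      by_cases hr : t ∈ r'
      · simp only [hr, not_true_eq_false, decide_false]
        exact beq_eq_false_iff_ne.mpr (fun h => (hLt.mp h) hr)
      · simp only [hr, not_false_eq_true, decide_true]
        exact beq_iff_eq.mpr (hLt.mpr hr)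
    have hc2 : (if L.getD t 0 == ((p.length : Nat) : Int)
            then (if F.getD t 0 == ((p.length : Nat) : Int) then c + 1 else c) + 1
            else (if F.getD t 0 == ((p.length : Nat) : Int) then c + 1 else c))
        = (DD (p ++ [t]) : Int) + (DD xs : Int) - (DD r' : Int) := by
      rw [hFb, hLb]
      rw [DD_cons t r'] at hc
      by_cases hp : t ∈ p <;> by_cases hr : t ∈ r' <;>
        simp [hp, hr] at hA hC hc ⊢ <;> omega
    rw [hc2]
    have hiff : (((DD (p ++ [t]) : Int) + (DD xs : Int) - (DD r' : Int)
        == ((DD xs : Nat) : Int)) = true) ↔ (DD (p ++ [t]) = DD r') := by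
      rw [beq_iff_eq]
      omega
    have hlen : ((p.length : Nat) : Int) + 1 = (((p ++ [t]).length : Nat) : Int) := by
      push_cast [List.length_append, List.length_singleton]
      ring
    rw [hlen, ih (p ++ [t]) _ _ (by rw [hxs]; simp) rfl]
    show (if ((DD (p ++ [t]) : Int) + (DD xs : Int) - (DD r' : Int)
        == ((DD xs : Nat) : Int)) = true then ans + 1 else ans) + cnt (p ++ [t]) r'
      = ans + cnt p (t :: r')
    show _ = ans + ((if DD (p ++ [t]) = DD r' then (1 : Int) else 0) + cnt (p ++ [t]) r')
    by_cases hd : DD (p ++ [t]) = DD r'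
    · rw [if_pos (hiff.mpr hd), if_pos hd]; ring
    · rw [if_neg (fun h => hd (hiff.mp h)), if_neg hd]; ring

-- ===== VERDICT =====
theorem solution_spec : Claim_equal_solution := by
  intro topping _
  unfold Spec_solution solution solution_alt
  simp only [rc0_eq_counter, first_fold_size]
  rw [A_loop topping PySem.Set.empty 0 _ (rinv_counter topping)]
  have hspec : specGo PySem.Set.empty topping = cnt [] topping := specGo_eq_cnt topping []
  have hF : ∀ (p : List Int) (t : Int) (r : List Int), topping = p ++ t :: r →
      ((((PySem.List.enumerate topping 0).foldl
          (fun (d : PySem.Dict Int Int) q => if d.contains q.2 then d else d.insert q.2 q.1)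
          PySem.Dict.empty).getD t 0 = ((p.length : Nat) : Int)) ↔ t ∉ p) := by
    intro p t r hx
    have hm : t ∈ topping := by rw [hx]; simp
    have hg := first_fold_get? topping 0 PySem.Dict.empty t
    rw [if_neg (by simp [PySem.Dict.contains_empty]), if_pos hm] at hg
    have hgd : ((PySem.List.enumerate topping 0).foldl
          (fun (d : PySem.Dict Int Int) q => if d.contains q.2 then d else d.insert q.2 q.1)
          PySem.Dict.empty).getD t 0 = (topping.idxOf t : Int) := by
      rw [PySem.Dict.getD_eq_get?_getD, hg]
      simp
    rw [hgd, hx]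
    exact idxOf_split p r t
  have hL : ∀ (p : List Int) (t : Int) (r : List Int), topping = p ++ t :: r →
      ((((PySem.List.enumerate topping 0).foldl
          (fun (d : PySem.Dict Int Int) q => d.insert q.2 q.1)
          PySem.Dict.empty).getD t 0 = ((p.length : Nat) : Int)) ↔ t ∉ r) := by
    intro p t r hx
    have hm : t ∈ topping := by rw [hx]; simp
    have hg := last_fold_get? topping 0 PySem.Dict.empty t
    rw [if_pos hm] at hg
    have hgd : ((PySem.List.enumerate topping 0).foldl
          (fun (d : PySem.Dict Int Int) q => d.insert q.2 q.1)
          PySem.Dict.empty).getD t 0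
        = (topping.length : Int) - 1 - (topping.reverse.idxOf t : Int) := by
      rw [PySem.Dict.getD_eq_get?_getD, hg]
      simp
    rw [hgd, hx]
    exact lastIdx_split p r t
  have hB := B_loop topping _ _ hF hL topping [] 0 0 rfl
    (by rw [show DD [] = 0 from rfl]; omega)
  simp only [List.length_nil, Nat.cast_zero] at hB
  rw [hspec]
  exact hB.symm
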